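-- pv_equiv track=rewrite | github.com/vandanchopra/MathematricksQ | AgenticDeveloper/tests/test_error_capture.py | check_errors_in_console_output
-- ===== SOURCE A (Python) =====
-- def check_errors_in_console_output(console_output: str) -> tuple[list, list]:
--     """Check for error messages and warnings in the console output and extract multi-line blocks."""
--     errors = []
--     warnings = []
--     lines = console_output.splitlines()
--     i = 0
--     while i < len(lines):
--         line = lines[i]
--         is_warning = "warning" in line.lower()
--         is_error = (
--             ("error" in line.lower() and "tracking error" not in line.lower())
--             or ("syntaxerror" in line.lower())
--             or ("traceback" in line.lower())
--             or ("exception" in line.lower())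
--             or ("failed" in line.lower() and "failed data requests" not in line.lower())
--             or ("could not" in line.lower())
--             or ("unable to" in line.lower())
--             or "compiler error" in line.lower()
--         )
--
--         if is_warning or is_error:
--             message_block = [line.rstrip()]
--             i += 1
--             # Capture any related context (indented lines, stack traces, etc.)
--             while i < len(lines) and (
--                 lines[i].startswith(" ")
--                 or lines[i].startswith("\t")
--                 or lines[i].startswith("***")
--                 or lines[i].strip() == ""
--                 or "at line" in lines[i].lower()
--                 or "at" in lines[i].lower()
--                 or "in" in lines[i].lower()
--             ):
--                 message_block.append(lines[i].rstrip())
--                 i += 1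
--             if is_warning:
--                 warnings.append("\n".join(message_block))
--             else:
--                 errors.append("\n".join(message_block))
--         else:
--             i += 1
--
--     return errors, warnings
-- ===== SOURCE B (Python) =====
-- def check_errors_in_console_output(console_output: str) -> tuple[list, list]:
--     """Single forward pass keeping an open block as explicit state instead of a nested scanning loop."""
--     errors = []
--     warnings = []
--     block = None
--     block_is_warning = False
--     for line in console_output.splitlines():
--         if block is not None:
--             low = line.lower()
--             if (line.startswith(" ") or line.startswith("\t") or line.startswith("***")
--                     or line.strip() == "" or "at line" in low or "at" in low or "in" in low):
--                 block.append(line.rstrip())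
--                 continue
--             (warnings if block_is_warning else errors).append("\n".join(block))
--             block = None
--         low = line.lower()
--         is_warning = "warning" in low
--         is_error = (("error" in low and "tracking error" not in low)
--                     or "syntaxerror" in low
--                     or "traceback" in low
--                     or "exception" in low
--                     or ("failed" in low and "failed data requests" not in low)
--                     or "could not" in low
--                     or "unable to" in low
--                     or "compiler error" in low)
--         if is_warning or is_error:
--             block = [line.rstrip()]
--             block_is_warning = is_warning
--     if block is not None:
--         (warnings if block_is_warning else errors).append("\n".join(block))
--     return errors, warnings
-- ===== Notes on version B (the rewrite author's own statement) =====
-- stated objective: simpler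
-- what changed: Replaced A's index-driven outer while with a nested context-consuming inner while by a single for-pass that carries the currently open block and its warning flag as explicit state and flushes it when a non-context line or the end of input is reached.
import Mathlib
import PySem

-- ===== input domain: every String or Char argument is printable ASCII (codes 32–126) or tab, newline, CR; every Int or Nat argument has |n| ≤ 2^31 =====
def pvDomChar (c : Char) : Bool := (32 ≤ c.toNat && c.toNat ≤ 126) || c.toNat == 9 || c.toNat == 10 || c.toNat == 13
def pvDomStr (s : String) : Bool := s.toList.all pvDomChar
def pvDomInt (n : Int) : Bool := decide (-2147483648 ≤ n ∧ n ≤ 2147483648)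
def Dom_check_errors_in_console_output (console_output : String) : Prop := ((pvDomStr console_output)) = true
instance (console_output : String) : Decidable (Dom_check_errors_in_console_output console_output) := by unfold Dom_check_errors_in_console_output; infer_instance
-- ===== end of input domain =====

-- B replaces A's nested index-driven while loops by a single forward pass that keeps the
-- currently-open block as explicit state (objective: simpler decomposition, same cost).

-- Shared line predicates (identical boolean expressions appear verbatim in both Pythons).
def pvIsWarning (line : String) : Bool :=
  PySem.Str.isIn "warning" (PySem.Str.lower line)

def pvIsError (line : String) : Bool :=
  let low := PySem.Str.lower line
  (PySem.Str.isIn "error" low && !PySem.Str.isIn "tracking error" low)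
  || PySem.Str.isIn "syntaxerror" low
  || PySem.Str.isIn "traceback" low
  || PySem.Str.isIn "exception" low
  || (PySem.Str.isIn "failed" low && !PySem.Str.isIn "failed data requests" low)
  || PySem.Str.isIn "could not" low
  || PySem.Str.isIn "unable to" low
  || PySem.Str.isIn "compiler error" low

def pvIsContext (line : String) : Bool :=
  PySem.Str.startswith line " "
  || PySem.Str.startswith line "\t"
  || PySem.Str.startswith line "***"
  || (PySem.Str.strip line == "")
  || PySem.Str.isIn "at line" (PySem.Str.lower line)
  || PySem.Str.isIn "at" (PySem.Str.lower line)
  || PySem.Str.isIn "in" (PySem.Str.lower line)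

-- ===== PORT A =====
-- A's inner while loop: consume context lines, returning the grown block and the unconsumed rest.
def pvCollectCtx : List String → List String → List String × List String
  | [], block => (block, [])
  | l :: rest, block =>
    if pvIsContext l then pvCollectCtx rest (block ++ [PySem.Str.rstrip l])
    else (block, l :: rest)

theorem pvCollectCtx_length_le (lines block : List String) :
    (pvCollectCtx lines block).2.length ≤ lines.length := by
  induction lines generalizing block with
  | nil => simp [pvCollectCtx]
  | cons l rest ih =>
    simp only [pvCollectCtx]
    split
    · exact le_trans (ih _) (Nat.le_succ _)
    · simp

-- A's outer while loop over the line index, with the two result accumulators.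
def pvGoA : List String → List String → List String → List String × List String
  | [], errors, warnings => (errors, warnings)
  | l :: rest, errors, warnings =>
    let is_warning := pvIsWarning l
    let is_error := pvIsError l
    if is_warning || is_error then
      let p := pvCollectCtx rest [PySem.Str.rstrip l]
      if is_warning then
        pvGoA p.2 errors (warnings ++ [PySem.Str.join "\n" p.1])
      else
        pvGoA p.2 (errors ++ [PySem.Str.join "\n" p.1]) warnings
    else
      pvGoA rest errors warnings
termination_by lines => lines.length
decreasing_by
  · exact Nat.lt_succ_of_le (pvCollectCtx_length_le _ _)
  · exact Nat.lt_succ_of_le (pvCollectCtx_length_le _ _)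
  · simp

def check_errors_in_console_output (console_output : String) : List String × List String :=
  pvGoA (PySem.Str.splitlines console_output) [] []

-- ===== PORT B =====
-- B's loop body: one line against the state (errors, warnings, open block with its flag).
def pvStepB (st : List String × List String × Option (List String × Bool)) (line : String) :
    List String × List String × Option (List String × Bool) :=
  let hdr : List String → List String → List String × List String × Option (List String × Bool) :=
    fun errors warnings =>
      let is_warning := pvIsWarning line
      if is_warning || pvIsError line then
        (errors, warnings, some ([PySem.Str.rstrip line], is_warning))
      else
        (errors, warnings, none)
  match st with
  | (errors, warnings, some (block, block_is_warning)) =>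
    if pvIsContext line then
      (errors, warnings, some (block ++ [PySem.Str.rstrip line], block_is_warning))
    else if block_is_warning then
      hdr errors (warnings ++ [PySem.Str.join "\n" block])
    else
      hdr (errors ++ [PySem.Str.join "\n" block]) warnings
  | (errors, warnings, none) => hdr errors warnings

-- B's final flush of a still-open block.
def pvFinish (st : List String × List String × Option (List String × Bool)) :
    List String × List String :=
  match st with
  | (errors, warnings, none) => (errors, warnings)
  | (errors, warnings, some (block, block_is_warning)) =>
    if block_is_warning then (errors, warnings ++ [PySem.Str.join "\n" block])
    else (errors ++ [PySem.Str.join "\n" block], warnings)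

def check_errors_in_console_output_alt (console_output : String) : List String × List String :=
  pvFinish ((PySem.Str.splitlines console_output).foldl pvStepB ([], [], none))

-- ===== PRECONDITION & SPEC =====
def Spec_check_errors_in_console_output (console_output : String) (out : List String × List String) : Prop := out = check_errors_in_console_output_alt console_output
instance (console_output : String) (out : List String × List String) : Decidable (Spec_check_errors_in_console_output console_output out) := by unfold Spec_check_errors_in_console_output; infer_instance

-- ===== CLAIM (what is proved, stated in full; the proofs are below) =====
def Claim_equal_check_errors_in_console_output : Prop := ∀ (console_output : String), Dom_check_errors_in_console_output console_output → Spec_check_errors_in_console_output console_output (check_errors_in_console_output console_output)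

-- ===== LEMMAS AND PROOFS =====

-- emitting a finished block into the right accumulator
def pvEmit (errors warnings block : List String) (f : Bool) : List String × List String :=
  if f then (errors, warnings ++ [PySem.Str.join "\n" block])
  else (errors ++ [PySem.Str.join "\n" block], warnings)

theorem pvMain (lines : List String) :
    (∀ block f errors warnings,
      pvFinish (lines.foldl pvStepB (errors, warnings, some (block, f))) =
        (pvGoA (pvCollectCtx lines block).2
          (pvEmit errors warnings (pvCollectCtx lines block).1 f).1
          (pvEmit errors warnings (pvCollectCtx lines block).1 f).2))
    ∧ (∀ errors warnings,
      pvFinish (lines.foldl pvStepB (errors, warnings, none)) = pvGoA lines errors warnings) := by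
  induction lines with
  | nil =>
    constructor
    · intro block f errors warnings
      cases f <;> simp [List.foldl, pvCollectCtx, pvGoA, pvFinish, pvEmit]
    · intro errors warnings
      simp [pvGoA, pvFinish]
  | cons l rest ih =>
    have hdrCase : ∀ errors warnings,
        pvFinish (rest.foldl pvStepB
          (let is_warning := pvIsWarning l
           if is_warning || pvIsError l then
             (errors, warnings, some ([PySem.Str.rstrip l], is_warning))
           else (errors, warnings, none))) = pvGoA (l :: rest) errors warnings := by
      intro errors warnings
      rw [pvGoA]
      by_cases hW : pvIsWarning l
      · simp only [hW, Bool.true_or, if_true]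
        rw [ih.1]
        simp [pvEmit]
      · simp only [hW, Bool.false_or]
        by_cases hE : pvIsError l
        · simp only [hE, if_true]
          rw [ih.1]
          simp [pvEmit]
        · simp only [hE]
          exact ih.2 errors warnings
    constructor
    · intro block f errors warnings
      by_cases hC : pvIsContext l
      · simp only [List.foldl, pvStepB, hC, if_true, pvCollectCtx]
        exact ih.1 (block ++ [PySem.Str.rstrip l]) f errors warnings
      · simp only [List.foldl, pvStepB, hC, pvCollectCtx, pvEmit]
        cases f with
        | true => simpa using hdrCase errors (warnings ++ [PySem.Str.join "\n" block])
        | false => simpa using hdrCase (errors ++ [PySem.Str.join "\n" block]) warnings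
    · intro errors warnings
      exact hdrCase errors warnings

-- ===== VERDICT (by name: the statement is the Claim_ definition above) =====
theorem check_errors_in_console_output_spec : Claim_equal_check_errors_in_console_output := by
  intro console_output _
  unfold Spec_check_errors_in_console_output check_errors_in_console_output
    check_errors_in_console_output_alt
  exact ((pvMain (PySem.Str.splitlines console_output)).2 [] []).symm
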